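-- pv_equiv track=rewrite | github.com/kristjanari/Forritun-Python | Tímaverkefni/Assignment 16/chess-players-p2.py | create_birth_year_dict
-- ===== SOURCE A (Python) =====
-- def create_birth_year_dict(chess_player_dict):
--     birth_year_dict = {}
--     for key, value in chess_player_dict.items():
--         birth_year = value[3]
--         if birth_year in birth_year_dict:
--             birth_year_dict[birth_year].append(key)
--         else:
--             birth_year_dict[birth_year] = [key]
--     return birth_year_dict
-- ===== SOURCE B (Python) =====
-- def create_birth_year_dict(chess_player_dict):
--     years = []
--     for value in chess_player_dict.values():
--         y = value[3]
--         if y not in years: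
--             years.append(y)
--     return {y: [k for k, v in chess_player_dict.items() if v[3] == y]
--             for y in years}
-- ===== Notes on version B (the rewrite author's own statement) =====
-- stated objective: alternative
-- what changed: B first collects the distinct birth years in first-occurrence order, then builds each year's key list with its own scan over the items (a dict comprehension), instead of A's single pass that mutates per-year lists inside a dict.
import Mathlib
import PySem

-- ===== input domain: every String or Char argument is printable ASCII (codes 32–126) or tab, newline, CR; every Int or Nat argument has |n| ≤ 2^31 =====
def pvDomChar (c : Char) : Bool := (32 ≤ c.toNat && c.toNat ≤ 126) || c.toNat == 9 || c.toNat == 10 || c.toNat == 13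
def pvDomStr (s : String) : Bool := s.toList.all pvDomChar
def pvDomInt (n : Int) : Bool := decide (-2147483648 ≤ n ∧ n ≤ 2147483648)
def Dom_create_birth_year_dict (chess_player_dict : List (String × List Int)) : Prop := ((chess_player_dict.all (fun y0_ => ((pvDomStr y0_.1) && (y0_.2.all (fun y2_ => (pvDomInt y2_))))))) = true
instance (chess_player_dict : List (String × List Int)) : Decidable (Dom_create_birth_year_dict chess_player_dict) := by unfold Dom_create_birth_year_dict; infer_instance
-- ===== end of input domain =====

-- B groups keys by birth year in two phases (distinct years first, then one scan per year)
-- instead of A's single pass mutating per-year lists in a dict; return values proved equal.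

-- ===== PORT A =====
-- single pass: for each (key, value), append key to birth_year_dict[value[3]] (create the entry if new)
def create_birth_year_dict (chess_player_dict : List (String × List Int)) : List (Int × List String) :=
  (chess_player_dict.foldl
    (fun (acc : PySem.Dict Int (List String)) kv =>
      let birth_year := PySem.List.pyGetD kv.2 3 0  -- value[3]; exact under Pre_ (length ≥ 4)
      if acc.contains birth_year then
        acc.modify birth_year [] (fun l => l ++ [kv.1])  -- birth_year_dict[birth_year].append(key)
      else
        acc.insert birth_year [kv.1])
    PySem.Dict.empty).items

-- ===== PORT B =====
-- phase 1: the distinct birth years in first-occurrence order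
def cbyd_years (chess_player_dict : List (String × List Int)) : PySem.Set Int :=
  chess_player_dict.foldl
    (fun ys kv => PySem.Set.add ys (PySem.List.pyGetD kv.2 3 0)) PySem.Set.empty

-- phase 2: one scan of the items per year (the dict comprehension)
def create_birth_year_dict_alt (chess_player_dict : List (String × List Int)) : List (Int × List String) :=
  (cbyd_years chess_player_dict).map
    (fun y => (y, (chess_player_dict.filter
        (fun kv => PySem.List.pyGetD kv.2 3 0 == y)).map (fun kv => kv.1)))

-- ===== PRECONDITION & SPEC =====
-- Pre_ excludes exactly the inputs where Python A raises IndexError: a value list shorter than 4 (value[3]).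
def Pre_create_birth_year_dict (chess_player_dict : List (String × List Int)) : Prop :=
  ∀ kv ∈ chess_player_dict, 4 ≤ kv.2.length
instance (chess_player_dict : List (String × List Int)) : Decidable (Pre_create_birth_year_dict chess_player_dict) := by unfold Pre_create_birth_year_dict; infer_instance

def pvWitness_create_birth_year_dict : (List (String × List Int)) :=
  [("carlsen", [1, 2, 3, 1990]), ("tal", [4, 5, 6, 1936]), ("karpov", [7, 8, 9, 1990])]

def Spec_create_birth_year_dict (chess_player_dict : List (String × List Int)) (out : List (Int × List String)) : Prop := out = create_birth_year_dict_alt chess_player_dict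
instance (chess_player_dict : List (String × List Int)) (out : List (Int × List String)) : Decidable (Spec_create_birth_year_dict chess_player_dict out) := by unfold Spec_create_birth_year_dict; infer_instance

-- ===== CLAIM (what is proved, stated in full; the proofs are below) =====
def Claim_equal_create_birth_year_dict : Prop := ∀ (chess_player_dict : List (String × List Int)), Dom_create_birth_year_dict chess_player_dict → Pre_create_birth_year_dict chess_player_dict → Spec_create_birth_year_dict chess_player_dict (create_birth_year_dict chess_player_dict)

-- ===== LEMMAS AND PROOFS =====

-- the year of one item
def cbyd_year (kv : String × List Int) : Int := PySem.List.pyGetD kv.2 3 0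

-- A's branching step is one Dict.modify (inserting a fresh key = modify with default [])
lemma cbyd_stepA_eq_modify (acc : PySem.Dict Int (List String)) (kv : String × List Int) :
    (if acc.contains (cbyd_year kv) then
        acc.modify (cbyd_year kv) [] (fun l => l ++ [kv.1])
      else acc.insert (cbyd_year kv) [kv.1])
      = acc.modify (cbyd_year kv) [] (fun l => l ++ [kv.1]) := by
  by_cases h : acc.contains (cbyd_year kv)
  · simp [h]
  · simp only [Bool.not_eq_true] at h
    simp [h, PySem.Dict.modify, PySem.Dict.getD_of_not_contains _ _ h]

-- A's fold is the modify-fold over the (year, key) pairs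
lemma cbyd_foldA_eq (d : List (String × List Int)) :
    (d.foldl
      (fun (acc : PySem.Dict Int (List String)) kv =>
        let birth_year := PySem.List.pyGetD kv.2 3 0
        if acc.contains birth_year then
          acc.modify birth_year [] (fun l => l ++ [kv.1])
        else acc.insert birth_year [kv.1]) PySem.Dict.empty)
      = (d.map (fun kv => (cbyd_year kv, kv.1))).foldl
          (fun acc p => acc.modify p.1 [] (fun l => l ++ [p.2])) PySem.Dict.empty := by
  rw [List.foldl_map]
  have hstep : (fun (acc : PySem.Dict Int (List String)) (kv : String × List Int) =>
      let birth_year := PySem.List.pyGetD kv.2 3 0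
      if acc.contains birth_year then acc.modify birth_year [] (fun l => l ++ [kv.1])
      else acc.insert birth_year [kv.1])
      = fun acc kv => acc.modify (cbyd_year kv) [] (fun l => l ++ [kv.1]) := by
    funext acc kv; exact cbyd_stepA_eq_modify acc kv
  rw [hstep]

-- B's year list is the ordered dedup of the years, which is exactly A's key list
lemma cbyd_years_eq (d : List (String × List Int)) :
    cbyd_years d = PySem.Set.ofList (d.map cbyd_year) := by
  unfold cbyd_years
  rw [← PySem.Set.update_map_eq_foldl_add]
  show PySem.Set.update [] _ = _
  rw [PySem.Set.update_nil_left]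
  rfl

-- ===== VERDICT (by name: the statement is the Claim_ definition above) =====
theorem create_birth_year_dict_spec : Claim_equal_create_birth_year_dict := by
  intro d _ _
  unfold Spec_create_birth_year_dict create_birth_year_dict create_birth_year_dict_alt
  rw [cbyd_foldA_eq, cbyd_years_eq]
  set l := d.map (fun kv => (cbyd_year kv, kv.1)) with hl
  have hnd : ((l.foldl (fun acc p => acc.modify p.1 [] (fun s => s ++ [p.2]))
      PySem.Dict.empty).keys).Nodup := by
    exact PySem.Dict.nodup_keys_foldl_modify_key l Prod.fst []
      (fun _ p => fun s => s ++ [p.2]) PySem.Dict.empty PySem.Dict.nodup_keys_empty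
  rw [PySem.Dict.items_eq_map_keys _ hnd []]
  have hkeys : (l.foldl (fun acc p => acc.modify p.1 [] (fun s => s ++ [p.2]))
      PySem.Dict.empty).keys = PySem.Set.ofList (d.map cbyd_year) := by
    rw [PySem.Dict.keys_foldl_modify_key l Prod.fst []
      (fun _ p => fun s => s ++ [p.2]) PySem.Dict.empty]
    rw [PySem.Dict.keys_empty, PySem.Set.update_nil_left, hl, List.map_map]
    simp only [Function.comp_def]
  rw [hkeys]
  apply List.map_congr_left
  intro y _
  rw [PySem.Dict.getD_foldl_modify_append, PySem.Dict.getD_empty, List.nil_append, hl,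
    List.filter_map, List.map_map]
  rfl
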